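-- pv_equiv track=rewrite | github.com/kunalworldwide/POTD | 20-06-2023.py | matchGame
-- ===== SOURCE A (Python) =====
-- def matchGame(N):
--      # code here
--     if N % 5 == 0:
--         return -1
--     for i in range(0,5):
--         c=N-i
--         if c % 5 == 0:
--             return i
--     return -1
-- ===== SOURCE B (Python) =====
-- def matchGame(N):
--     r = N % 5
--     return -1 if r == 0 else r
-- ===== Notes on version B (the rewrite author's own statement) =====
-- stated objective: simpler
-- what changed: Replaces the 5-iteration linear search for the i with (N-i) % 5 == 0 by the closed form N % 5 (returning -1 when it is 0), eliminating the loop entirely.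
import Mathlib
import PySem

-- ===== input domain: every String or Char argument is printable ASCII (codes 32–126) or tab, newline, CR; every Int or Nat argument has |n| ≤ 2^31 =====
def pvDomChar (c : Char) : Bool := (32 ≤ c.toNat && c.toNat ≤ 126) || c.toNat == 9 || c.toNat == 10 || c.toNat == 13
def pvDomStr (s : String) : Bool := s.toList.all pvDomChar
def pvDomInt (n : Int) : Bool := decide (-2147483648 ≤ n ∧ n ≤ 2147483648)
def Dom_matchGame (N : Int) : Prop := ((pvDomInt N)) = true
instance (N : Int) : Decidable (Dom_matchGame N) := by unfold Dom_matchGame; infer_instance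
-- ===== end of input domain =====

-- B replaces A's 5-step linear search with the closed form N % 5 (simpler; no loop).

-- ===== PORT A =====
-- the 'for i in range(0,5)' loop: return the first i with (N-i) % 5 == 0, else -1
def matchGameLoop (N : Int) : List Int → Int
  | [] => -1
  | i :: rest =>
      if PySem.Int.mod (N - i) 5 = 0 then i else matchGameLoop N rest

def matchGame (N : Int) : Int :=
  if PySem.Int.mod N 5 = 0 then -1
  else matchGameLoop N (PySem.List.pyRange 0 5 1)

-- ===== PORT B =====
def matchGame_alt (N : Int) : Int :=
  let r := PySem.Int.mod N 5
  if r = 0 then -1 else r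

-- ===== PRECONDITION & SPEC =====
def Spec_matchGame (N : Int) (out : Int) : Prop := out = matchGame_alt N
instance (N : Int) (out : Int) : Decidable (Spec_matchGame N out) := by unfold Spec_matchGame; infer_instance

-- ===== CLAIM (what is proved, stated in full; the proofs are below) =====
def Claim_equal_matchGame : Prop := ∀ (N : Int), Dom_matchGame N → Spec_matchGame N (matchGame N)

-- ===== LEMMAS AND PROOFS =====

theorem pyRange05 : PySem.List.pyRange 0 5 1 = [0, 1, 2, 3, 4] := by decide

-- ===== VERDICT (by name: the statement is the Claim_ definition above) =====
theorem matchGame_spec : Claim_equal_matchGame := by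
  intro N _
  unfold Spec_matchGame matchGame matchGame_alt
  rw [pyRange05]
  simp only [matchGameLoop, PySem.Int.mod_eq_emod_of_pos (by norm_num : (0:Int) < 5)]
  have h := Int.emod_emod_of_dvd N (dvd_refl 5)
  have h0 : 0 ≤ N % 5 := Int.emod_nonneg N (by norm_num)
  have h5 : N % 5 < 5 := Int.emod_lt_of_pos N (by norm_num)
  interval_cases h' : N % 5 <;> simp_all <;> omega
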